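-- pv_equiv track=rewrite | github.com/sugan0tech/Projects | programming/python/accenture/cyclone.py | solution
-- ===== SOURCE A (Python) =====
-- def sensor1(n: int) -> list:
--     lst = [1]
--     temp = 1
--     for i in range(n):
--         temp *= 2
--         for i in range(int(temp/2)):
--             if len(lst) < n:
--                 lst.append(temp)
--             if len(lst) > n:
--                 return lst
--     return lst
--
-- def sensor2(n:int, x:int) -> list:
--     temp = x
--     lst = []
--     for i in range(n):
--         if True:
--             for i in range(x):
--                 if len(lst) < n:
--                     lst.append(temp)
--         temp += x
--     lst.sort()
--     return lst
--
-- def solution(l, r, x):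
--     lst1 = sensor1(r)
--     lst2 = sensor2(r, x)
--     lst1v = 0
--     lst2v = 0
--     for i in range(l - 1, r):
--         if lst1[i] < lst2[i]:
--             lst1v += 1
--         if lst1[i] > lst2[i]:
--             lst2v += 1
--     if lst1v > lst2v:
--         return 1
--     elif lst2v > lst1v:
--         return 2
--     else :
--         return 0
-- ===== SOURCE B (Python) =====
-- def solution(l, r, x):
--     # Closed forms: sensor1's i-th value is the smallest power of two > i,
--     # sensor2's i-th value (x >= 1) is x * (i // x + 1); no lists, no sort,
--     # no exponential filling loop.
--     lst1v = 0
--     lst2v = 0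
--     for i in range(l - 1, r):
--         v1 = 1 << i.bit_length()
--         v2 = x * (i // x + 1)
--         if v1 < v2:
--             lst1v += 1
--         elif v1 > v2:
--             lst2v += 1
--     if lst1v > lst2v:
--         return 1
--     elif lst2v > lst1v:
--         return 2
--     else:
--         return 0
-- ===== Notes on version B (the rewrite author's own statement) =====
-- stated objective: faster
-- what changed: B replaces A's exponential-time list construction (sensor1 re-runs an inner loop of 2^i dummy iterations per step, sensor2 builds and sorts a list) by per-index closed forms -- smallest power of two above i and x*(i//x+1) -- evaluated in one pass over [l-1, r-1]; intended as faster: a timing run could not measure a ratio because A already times out around r=16 where B returns instantly.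
-- outside the precondition, e.g. on solution(0, 2, 1): A returns 0, B returns 2; on solution(-3, 5, 1): A returns 2, B returns 2
import Mathlib
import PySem

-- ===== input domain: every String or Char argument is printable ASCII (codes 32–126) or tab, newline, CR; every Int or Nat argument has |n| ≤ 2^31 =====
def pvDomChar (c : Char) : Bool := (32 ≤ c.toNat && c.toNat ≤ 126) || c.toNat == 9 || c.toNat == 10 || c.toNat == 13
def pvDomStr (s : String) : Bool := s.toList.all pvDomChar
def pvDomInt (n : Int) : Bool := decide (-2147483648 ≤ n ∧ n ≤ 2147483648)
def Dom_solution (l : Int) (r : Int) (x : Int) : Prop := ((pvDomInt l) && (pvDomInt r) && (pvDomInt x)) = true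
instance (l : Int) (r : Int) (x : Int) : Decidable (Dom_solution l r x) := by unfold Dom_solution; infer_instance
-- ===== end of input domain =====

-- B replaces A's exponential list construction and sort by per-index closed forms; return-value equivalence on Pre_.

-- ===== PORT A =====
-- inner loop of sensor1: 'for i in range(c): if len(lst) < n: lst.append(temp); if len(lst) > n: return lst'
-- (the Bool flags the early 'return lst')
def sensor1Inner (n : Int) (c : Nat) (lst : List Int) (temp : Int) : List Int × Bool :=
  match c with
  | 0 => (lst, false)
  | c + 1 =>
    let lst' := if (lst.length : Int) < n then lst ++ [temp] else lst
    if (lst'.length : Int) > n then (lst', true) else sensor1Inner n c lst' temp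

-- outer loop of sensor1.  'int(temp/2)' is ported as exact integer division: temp is a power of two,
-- exact in Python's float division for all iterations reached when r ≤ 1024 (Pre_); beyond that Python raises OverflowError.
def sensor1Outer (n : Int) (c : Nat) (lst : List Int) (temp : Int) : List Int :=
  match c with
  | 0 => lst
  | c + 1 =>
    let temp' := temp * 2
    let p := sensor1Inner n (PySem.Int.floordiv temp' 2).toNat lst temp'
    if p.2 then p.1 else sensor1Outer n c p.1 temp'

def sensor1 (n : Int) : List Int := sensor1Outer n n.toNat [1] 1

-- inner loop of sensor2: 'for i in range(x): if len(lst) < n: lst.append(temp)'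
def sensor2Inner (n : Int) (c : Nat) (lst : List Int) (temp : Int) : List Int :=
  match c with
  | 0 => lst
  | c + 1 => sensor2Inner n c (if (lst.length : Int) < n then lst ++ [temp] else lst) temp

def sensor2Loop (n : Int) (x : Int) (c : Nat) (lst : List Int) (temp : Int) : List Int :=
  match c with
  | 0 => lst
  | c + 1 => sensor2Loop n x c (sensor2Inner n x.toNat lst temp) (temp + x)

def sensor2 (n : Int) (x : Int) : List Int :=
  PySem.List.sorted (sensor2Loop n x n.toNat [] x) (fun v => v)

def solution (l : Int) (r : Int) (x : Int) : Int :=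
  let lst1 := sensor1 r
  let lst2 := sensor2 r x
  let st := (PySem.List.pyRange (l - 1) r 1).foldl (fun (ab : Int × Int) i =>
    let v1 := PySem.List.pyGetD lst1 i 0
    let v2 := PySem.List.pyGetD lst2 i 0
    (if v1 < v2 then ab.1 + 1 else ab.1, if v1 > v2 then ab.2 + 1 else ab.2)) (0, 0)
  if st.1 > st.2 then 1 else if st.2 > st.1 then 2 else 0

-- ===== PORT B =====
def solution_alt (l : Int) (r : Int) (x : Int) : Int :=
  let st := (PySem.List.pyRange (l - 1) r 1).foldl (fun (ab : Int × Int) i =>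
    let v1 : Int := 2 ^ PySem.Int.bitLength i    -- 1 << i.bit_length()
    let v2 : Int := x * (PySem.Int.floordiv i x + 1)
    if v1 < v2 then (ab.1 + 1, ab.2)
    else if v1 > v2 then (ab.1, ab.2 + 1)
    else ab) (0, 0)
  if st.1 > st.2 then 1 else if st.2 > st.1 then 2 else 0

-- ===== PRECONDITION & SPEC =====
-- Pre_ excludes: x ≤ 0 with l ≤ r (A raises IndexError: sensor2 returns []); r ≥ 1025 (A raises
-- OverflowError in int(temp/2)); and l ≤ 0 with l ≤ r, outside the natural 1-indexed range, where A
-- either raises IndexError or accidentally compares the lists' tail elements via negative-index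
-- wraparound (on some of those wraparound inputs A's accidental value happens to coincide with B's).
def Pre_solution (l : Int) (r : Int) (x : Int) : Prop :=
  r ≤ 1024 ∧ (r < l ∨ (1 ≤ l ∧ 1 ≤ x))
instance (l : Int) (r : Int) (x : Int) : Decidable (Pre_solution l r x) := by unfold Pre_solution; infer_instance
def pvWitness_solution : Int × Int × Int := (1, 5, 2)
def Spec_solution (l : Int) (r : Int) (x : Int) (out : Int) : Prop := out = solution_alt l r x
instance (l : Int) (r : Int) (x : Int) (out : Int) : Decidable (Spec_solution l r x out) := by unfold Spec_solution; infer_instance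

-- ===== CLAIM (what is proved, stated in full; the proofs are below) =====
def Claim_equal_solution : Prop := ∀ (l : Int) (r : Int) (x : Int), Dom_solution l r x → Pre_solution l r x → Spec_solution l r x (solution l r x)

-- ===== LEMMAS AND PROOFS =====

-- the value sequences the two sensors produce
def pvF1 (i : Int) : Int := 2 ^ PySem.Int.bitLength i
def pvF2 (x : Int) (i : Int) : Int := x * (PySem.Int.floordiv i x + 1)
def pvP (m : Nat) : List Int := (List.range m).map (fun j : Nat => pvF1 (j : Int))
def pvQ (x : Int) (m : Nat) : List Int := (List.range m).map (fun j : Nat => pvF2 x (j : Int))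

lemma pvInner1 (c : Nat) : ∀ (n : Int) (lst : List Int) (temp : Int), (lst.length : Int) ≤ n →
    sensor1Inner n c lst temp = (lst ++ List.replicate (min c (n.toNat - lst.length)) temp, false) := by
  induction c with
  | zero => intro n lst temp h; simp [sensor1Inner]
  | succ c ih =>
    intro n lst temp h
    by_cases hlt : (lst.length : Int) < n
    · have h1 : ((lst ++ [temp]).length : Int) ≤ n := by simp; omega
      have h2 : ¬ (((lst ++ [temp]).length : Int) > n) := by omega
      rw [sensor1Inner]
      simp only [hlt, if_pos]
      rw [if_neg h2, ih n (lst ++ [temp]) temp h1]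
      have : min (c + 1) (n.toNat - lst.length) = min c (n.toNat - (lst ++ [temp]).length) + 1 := by
        simp only [List.length_append, List.length_cons, List.length_nil]
        omega
      rw [this]
      simp [List.replicate_succ, List.append_assoc]
    · have he : n.toNat - lst.length = 0 := by omega
      rw [sensor1Inner]
      simp only [hlt, if_false]
      rw [if_neg (by omega), ih n lst temp h]
      simp [he]

lemma pvInner2 (c : Nat) : ∀ (n : Int) (lst : List Int) (temp : Int), (lst.length : Int) ≤ n →
    sensor2Inner n c lst temp = lst ++ List.replicate (min c (n.toNat - lst.length)) temp := by
  induction c with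
  | zero => intro n lst temp h; simp [sensor2Inner]
  | succ c ih =>
    intro n lst temp h
    by_cases hlt : (lst.length : Int) < n
    · have h1 : ((lst ++ [temp]).length : Int) ≤ n := by simp; omega
      rw [sensor2Inner, if_pos hlt, ih n (lst ++ [temp]) temp h1]
      have : min (c + 1) (n.toNat - lst.length) = min c (n.toNat - (lst ++ [temp]).length) + 1 := by
        simp only [List.length_append, List.length_cons, List.length_nil]
        omega
      rw [this]
      simp [List.replicate_succ, List.append_assoc]
    · have he : n.toNat - lst.length = 0 := by omega
      rw [sensor2Inner, if_neg hlt, ih n lst temp h]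
      simp [he]

lemma pvBitLen (d j : Nat) (h1 : 2 ^ d ≤ j) (h2 : j < 2 ^ (d + 1)) :
    PySem.Int.bitLength (j : Int) = d + 1 := by
  have hpd : 0 < 2 ^ d := Nat.two_pow_pos d
  have hj0 : (j : Int) ≠ 0 := by
    have : 0 < j := by omega
    exact_mod_cast this.ne'
  have hu := PySem.Int.lt_two_pow_bitLength (j : Int)
  have hl := PySem.Int.two_pow_bitLength_le (j : Int) hj0
  rw [Int.natAbs_natCast] at hu hl
  set b := PySem.Int.bitLength (j : Int) with hb
  have hb1 : d < b := by
    by_contra hc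
    have : (2:Nat) ^ b ≤ 2 ^ d := Nat.pow_le_pow_right (by norm_num) (by omega)
    omega
  have hb2 : b - 1 < d + 1 := by
    by_contra hc
    have : (2:Nat) ^ (d+1) ≤ 2 ^ (b-1) := Nat.pow_le_pow_right (by norm_num) (by omega)
    omega
  omega

lemma pvPrefixExt (f : Nat → Int) (m k : Nat) (v : Int) (hv : ∀ j, m ≤ j → j < m + k → f j = v) :
    (List.range (m + k)).map f = (List.range m).map f ++ List.replicate k v := by
  rw [List.range_add, List.map_append, List.map_map]
  congr 1
  rw [List.eq_replicate_iff]
  constructor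
  · simp
  · intro b hb
    simp only [List.mem_map, List.mem_range] at hb
    obtain ⟨j, hj, rfl⟩ := hb
    exact hv (m + j) (by omega) (by omega)

lemma pvLenP (m : Nat) : (pvP m).length = m := by simp [pvP]

lemma pvStep1 (N d : Nat) (hN : 1 ≤ N) :
    pvP (min N (2 ^ d)) ++
      List.replicate (min (2 ^ d) (N - (min N (2 ^ d)))) ((2 : Int) ^ (d + 1)) =
      pvP (min N (2 ^ (d + 1))) := by
  have hpd : 0 < 2 ^ d := Nat.two_pow_pos d
  have hdd : 2 ^ (d + 1) = 2 ^ d + 2 ^ d := by rw [pow_succ]; omega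
  set m := min N (2 ^ d) with hm
  set k := min (2 ^ d) (N - m) with hk
  have hmk : min N (2 ^ (d + 1)) = m + k := by omega
  rw [hmk]
  have hv : ∀ j : Nat, m ≤ j → j < m + k → pvF1 (j : Int) = (2 : Int) ^ (d + 1) := by
    intro j hj1 hj2
    have hk0 : 0 < k := by omega
    have hma : m = 2 ^ d := by omega
    have hbl : PySem.Int.bitLength (j : Int) = d + 1 :=
      pvBitLen d j (by omega) (by omega)
    simp [pvF1, hbl]
  exact (pvPrefixExt (fun j : Nat => pvF1 (j : Int)) m k ((2 : Int) ^ (d + 1)) hv).symm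

lemma pvOuter1 (c : Nat) : ∀ (N d : Nat), 1 ≤ N →
    sensor1Outer (N : Int) c (pvP (min N (2 ^ d))) ((2 : Int) ^ d) = pvP (min N (2 ^ (d + c))) := by
  induction c with
  | zero => intro N d hN; simp [sensor1Outer]
  | succ c ih =>
    intro N d hN
    rw [sensor1Outer]
    have htemp : (2 : Int) ^ d * 2 = 2 ^ (d + 1) := by ring
    have hfd : (PySem.Int.floordiv ((2 : Int) ^ d * 2) 2).toNat = 2 ^ d := by
      rw [PySem.Int.floordiv_eq_ediv_of_pos (by norm_num)]
      rw [Int.mul_ediv_cancel _ (by norm_num)]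
      have : (2 : Int) ^ d = ((2 ^ d : Nat) : Int) := by push_cast; ring
      rw [this, Int.toNat_natCast]
    have hlen : (((pvP (min N (2 ^ d))).length : Nat) : Int) ≤ (N : Int) := by
      rw [pvLenP]; exact_mod_cast Nat.min_le_left _ _
    rw [hfd, pvInner1 _ _ _ _ hlen]
    simp only [pvLenP, Int.toNat_natCast, htemp, Bool.false_eq_true, if_false]
    rw [pvStep1 N d hN, ih N (d + 1) hN, show d + 1 + c = d + (c + 1) from by omega]

lemma pvS1 (N : Nat) (hN : 1 ≤ N) : sensor1 (N : Int) = pvP N := by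
  have hp := pvOuter1 N N 0 hN
  have hmin1 : min N (2 ^ 0) = 1 := by simp only [pow_zero]; omega
  have hP1 : pvP 1 = [1] := by decide
  have hlt : N < 2 ^ N := Nat.lt_two_pow_self
  have hminN : min N (2 ^ (0 + N)) = N := by rw [Nat.zero_add]; omega
  rw [hmin1, hP1, hminN, pow_zero] at hp
  unfold sensor1
  rw [Int.toNat_natCast]
  exact hp

lemma pvLenQ (x : Int) (m : Nat) : (pvQ x m).length = m := by simp [pvQ]

lemma pvStep2 (N : Nat) (x : Int) (d : Nat) (hx : 1 ≤ x) :
    pvQ x (min N (d * x.toNat)) ++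
      List.replicate (min x.toNat (N - (min N (d * x.toNat)))) (x * ((d : Int) + 1)) =
      pvQ x (min N ((d + 1) * x.toNat)) := by
  have hX1 : 1 ≤ x.toNat := by omega
  have hXc : ((x.toNat : Nat) : Int) = x := Int.toNat_of_nonneg (by omega)
  have hsucc : (d + 1) * x.toNat = d * x.toNat + x.toNat := by ring
  set m := min N (d * x.toNat) with hm
  set k := min x.toNat (N - m) with hk
  have hmk : min N ((d + 1) * x.toNat) = m + k := by omega
  rw [hmk]
  have hv : ∀ j : Nat, m ≤ j → j < m + k → pvF2 x (j : Int) = x * ((d : Int) + 1) := by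
    intro j hj1 hj2
    have hk0 : 0 < k := by omega
    have hma : m = d * x.toNat := by omega
    have hfd : PySem.Int.floordiv (j : Int) x = (d : Int) := by
      rw [PySem.Int.floordiv_eq_iff_of_pos (by omega)]
      constructor
      · calc ((d : Int)) * x = ((d * x.toNat : Nat) : Int) := by push_cast [hXc]; ring
          _ ≤ (j : Int) := by exact_mod_cast (by omega : d * x.toNat ≤ j)
      · calc (j : Int) < ((d * x.toNat + x.toNat : Nat) : Int) := by
              exact_mod_cast (by omega : j < d * x.toNat + x.toNat)
          _ = ((d : Int) + 1) * x := by push_cast [hXc]; ring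
    simp [pvF2, hfd]
  exact (pvPrefixExt (fun j : Nat => pvF2 x (j : Int)) m k (x * ((d : Int) + 1)) hv).symm

lemma pvOuter2 (c : Nat) : ∀ (N : Nat) (x : Int) (d : Nat), 1 ≤ x →
    sensor2Loop (N : Int) x c (pvQ x (min N (d * x.toNat))) (x * ((d : Int) + 1)) =
      pvQ x (min N ((d + c) * x.toNat)) := by
  induction c with
  | zero => intro N x d hx; simp [sensor2Loop]
  | succ c ih =>
    intro N x d hx
    rw [sensor2Loop]
    have hlen : (((pvQ x (min N (d * x.toNat))).length : Nat) : Int) ≤ (N : Int) := by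
      rw [pvLenQ]; exact_mod_cast Nat.min_le_left _ _
    rw [pvInner2 _ _ _ _ hlen]
    simp only [pvLenQ, Int.toNat_natCast]
    rw [pvStep2 N x d hx]
    have htemp : x * ((d : Int) + 1) + x = x * (((d + 1 : Nat) : Int) + 1) := by push_cast; ring
    rw [htemp, ih N x (d + 1) hx, show d + 1 + c = d + (c + 1) from by omega]

lemma pvS2 (N : Nat) (x : Int) (hN : 1 ≤ N) (hx : 1 ≤ x) : sensor2 (N : Int) x = pvQ x N := by
  have hp := pvOuter2 N N x 0 hx
  have hmin0 : min N (0 * x.toNat) = 0 := by omega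
  have hQ0 : pvQ x 0 = [] := by simp [pvQ]
  have hNX : N ≤ N * x.toNat := Nat.le_mul_of_pos_right N (by omega)
  have hminN : min N ((0 + N) * x.toNat) = N := by rw [Nat.zero_add]; omega
  rw [hmin0, hQ0, hminN] at hp
  have hx1 : x * ((0 : Int) + 1) = x := by ring
  rw [show ((0 : Nat) : Int) = (0 : Int) from rfl, hx1] at hp
  unfold sensor2
  rw [Int.toNat_natCast, hp]
  apply PySem.List.sorted_eq_self_of_pairwise
  have hr : (List.range N).Pairwise (· < ·) := List.pairwise_lt_range
  unfold pvQ
  rw [List.pairwise_map]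
  apply hr.imp_of_mem
  intro a b _ _ hab
  have hdiv : PySem.Int.floordiv (a : Int) x ≤ PySem.Int.floordiv (b : Int) x := by
    rw [PySem.Int.floordiv_eq_ediv_of_pos (by omega), PySem.Int.floordiv_eq_ediv_of_pos (by omega)]
    exact Int.ediv_le_ediv (by omega) (by exact_mod_cast hab.le)
  unfold pvF2
  exact mul_le_mul_of_nonneg_left (by omega) (by omega)

-- ===== VERDICT (by name: the statement is the Claim_ definition above) =====
lemma pvGetP (r i : Int) (hr : 0 ≤ r) (h0 : 0 ≤ i) (h1 : i < r) :
    PySem.List.pyGetD (pvP r.toNat) i 0 = pvF1 i := by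
  have hlen : i < ((pvP r.toNat).length : Int) := by rw [pvLenP]; omega
  rw [PySem.List.pyGetD_eq_getElem _ _ h0 hlen]
  have hi : i.toNat < r.toNat := by omega
  simp only [pvP, List.getElem_map, List.getElem_range]
  congr 1
  omega

lemma pvGetQ (r x i : Int) (hr : 0 ≤ r) (h0 : 0 ≤ i) (h1 : i < r) :
    PySem.List.pyGetD (pvQ x r.toNat) i 0 = pvF2 x i := by
  have hlen : i < ((pvQ x r.toNat).length : Int) := by rw [pvLenQ]; omega
  rw [PySem.List.pyGetD_eq_getElem _ _ h0 hlen]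
  have hi : i.toNat < r.toNat := by omega
  simp only [pvQ, List.getElem_map, List.getElem_range]
  congr 1
  omega

theorem solution_spec : Claim_equal_solution := by
  intro l r x _ hpre
  unfold Spec_solution solution solution_alt
  obtain ⟨hr1024, hcase⟩ := hpre
  by_cases hlr : r < l
  · rw [PySem.List.pyRange_one_eq_nil (by omega)]
    simp
  · have hl : 1 ≤ l := by rcases hcase with h | ⟨h, _⟩ <;> omega
    have hx : 1 ≤ x := by rcases hcase with h | ⟨_, h⟩ <;> omega
    have hr1 : 1 ≤ r := by omega
    have hrN : r = ((r.toNat : Nat) : Int) := by omega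
    have h1 : sensor1 r = pvP r.toNat := by rw [hrN]; exact pvS1 r.toNat (by omega)
    have h2 : sensor2 r x = pvQ x r.toNat := by rw [hrN]; exact pvS2 r.toNat x (by omega) hx
    dsimp only
    rw [h1, h2]
    have hfold : (PySem.List.pyRange (l - 1) r 1).foldl (fun (ab : Int × Int) i =>
        (if PySem.List.pyGetD (pvP r.toNat) i 0 < PySem.List.pyGetD (pvQ x r.toNat) i 0 then ab.1 + 1 else ab.1,
         if PySem.List.pyGetD (pvP r.toNat) i 0 > PySem.List.pyGetD (pvQ x r.toNat) i 0 then ab.2 + 1 else ab.2)) (0, 0) =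
        (PySem.List.pyRange (l - 1) r 1).foldl (fun (ab : Int × Int) i =>
        if (2 : Int) ^ PySem.Int.bitLength i < x * (PySem.Int.floordiv i x + 1) then (ab.1 + 1, ab.2)
        else if (2 : Int) ^ PySem.Int.bitLength i > x * (PySem.Int.floordiv i x + 1) then (ab.1, ab.2 + 1)
        else ab) (0, 0) := by
      apply PySem.List.foldl_congr_mem
      intro acc i hi
      rw [PySem.List.mem_pyRange_one] at hi
      have h0 : 0 ≤ i := by omega
      rw [pvGetP r i (by omega) h0 hi.2, pvGetQ r x i (by omega) h0 hi.2]
      unfold pvF1 pvF2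
      rcases lt_trichotomy ((2 : Int) ^ PySem.Int.bitLength i) (x * (PySem.Int.floordiv i x + 1)) with h | h | h
      · rw [if_pos h, if_neg (by omega), if_pos h]
      · rw [if_neg (by omega), if_neg (by omega), if_neg (by omega), if_neg (by omega)]
      · rw [if_neg (by omega), if_pos (by omega), if_neg (by omega), if_pos (by omega)]
    rw [hfold]
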